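-- pv_equiv track=rewrite | github.com/cerencodes/class-app | pages/customerbot.py | collect_model_metric_sets
-- ===== SOURCE A (Python) =====
-- def collect_model_metric_sets(model_fields: dict[str, set[str]]) -> tuple[list[str], list[str]]:
--     if not model_fields:
--         return [], []
--
--     comparable_score_fields = sorted(
--         set.intersection(
--             *[
--                 {
--                     field[: -len("_score")]
--                     for field in fields
--                     if field.endswith("_score")
--                     and f"{field[: -len('_score')]}_reasoning" in fields
--                 }
--                 for fields in model_fields.values()
--             ]
--         )
--     )
--     paired_field_names = {
--         field_name
--         for dimension_name in comparable_score_fields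
--         for field_name in (f"{dimension_name}_score", f"{dimension_name}_reasoning")
--     }
--     aggregate_fields = sorted(
--         set.union(
--             *[
--                 {
--                     field
--                     for field in fields
--                     if field not in paired_field_names
--                 }
--                 for fields in model_fields.values()
--             ]
--         )
--     )
--     return comparable_score_fields, aggregate_fields
-- ===== SOURCE B (Python) =====
-- def collect_model_metric_sets(model_fields: dict[str, set[str]]) -> tuple[list[str], list[str]]:
--     if not model_fields:
--         return [], []
--     n = len(model_fields)
--     counts: dict[str, int] = {}
--     all_fields: set[str] = set()
--     for fields in model_fields.values():
--         all_fields |= fields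
--         dims = {
--             field[: -len("_score")]
--             for field in fields
--             if field.endswith("_score")
--             and field[: -len("_score")] + "_reasoning" in fields
--         }
--         for dim in dims:
--             counts[dim] = counts.get(dim, 0) + 1
--     comparable_score_fields = sorted(d for d, c in counts.items() if c == n)
--     paired_field_names = {
--         d + suffix
--         for d in comparable_score_fields
--         for suffix in ("_score", "_reasoning")
--     }
--     aggregate_fields = sorted(f for f in all_fields if f not in paired_field_names)
--     return comparable_score_fields, aggregate_fields
-- ===== Notes on version B (the rewrite author's own statement) =====
-- stated objective: alternative
-- what changed: Replaces set.intersection/set.union star-unpacking over per-model comprehension lists with a single accumulation pass keeping a per-dimension frequency table and a running union of all fields, then selects dimensions whose count equals the number of models and filters the union against the paired names.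
import Mathlib
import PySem

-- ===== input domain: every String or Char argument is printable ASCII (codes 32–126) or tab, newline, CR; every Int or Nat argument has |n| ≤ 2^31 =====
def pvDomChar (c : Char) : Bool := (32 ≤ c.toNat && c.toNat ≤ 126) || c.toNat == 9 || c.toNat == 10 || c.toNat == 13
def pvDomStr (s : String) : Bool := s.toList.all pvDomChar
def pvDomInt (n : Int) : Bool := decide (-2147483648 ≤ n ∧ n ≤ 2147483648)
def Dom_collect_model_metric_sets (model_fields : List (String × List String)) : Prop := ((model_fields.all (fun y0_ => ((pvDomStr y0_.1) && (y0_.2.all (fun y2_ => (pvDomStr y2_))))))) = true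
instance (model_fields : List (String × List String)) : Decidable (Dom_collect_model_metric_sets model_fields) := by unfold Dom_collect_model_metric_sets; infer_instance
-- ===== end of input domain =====

-- B replaces A's set.intersection/set.union star-unpacking with one accumulation pass keeping a
-- per-dimension frequency table and a running union of all fields (alternative decomposition, same cost).

-- ===== PORT A =====
-- shared input decoding: the Python argument is dict[str, set[str]]; the association list becomes
-- the insertion-ordered dict (duplicate keys overwrite in place) and each value list becomes a set
def pvToDict (model_fields : List (String × List String)) : PySem.Dict String (List String) :=
  model_fields.foldl (fun d p => d.insert p.1 (PySem.Set.ofList p.2)) PySem.Dict.empty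

-- field[: -len("_score")]
def pvTrunc (f : String) : String := PySem.Str.slice f none (some (-6))

-- f"{a}{b}" / a + b (string concatenation, PySem-transparent)
def pvCat (a b : String) : String := PySem.Str.join "" [a, b]

-- field.endswith("_score") and f"{field[: -len('_score')]}_reasoning" in fields
def pvOk (fields : List String) (f : String) : Bool :=
  PySem.Str.endswith f "_score" && PySem.Set.contains fields (pvCat (pvTrunc f) "_reasoning")

-- { field[: -len("_score")] for field in fields if … }  (both Pythons contain this comprehension)
def pvDims (fields : List String) : PySem.Set String :=
  PySem.Set.ofList ((fields.filter (pvOk fields)).map pvTrunc)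

-- { f"{d}_score", f"{d}_reasoning" for d in comparable }  (identical in both Pythons)
def pvPaired (comparable : List String) : PySem.Set String :=
  PySem.Set.ofList (comparable.flatMap (fun dn => [pvCat dn "_score", pvCat dn "_reasoning"]))

def collect_model_metric_sets (model_fields : List (String × List String)) : List String × List String :=
  if model_fields = [] then ([], [])
  else
    match (pvToDict model_fields).values with
    | [] => ([], [])   -- unreachable: the dict of a nonempty association list is nonempty
    | v :: rest =>
      -- sorted(set.intersection(*[{…} for fields in model_fields.values()]))
      let comparable := PySem.List.sorted ((rest.map pvDims).foldl PySem.Set.inter (pvDims v)) (fun x => x) false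
      let paired := pvPaired comparable
      -- sorted(set.union(*[{field for field in fields if field not in paired} for fields in …]))
      let filt := fun (fields : List String) =>
        PySem.Set.ofList (fields.filter (fun f => !(PySem.Set.contains paired f)))
      let aggregate := PySem.List.sorted ((rest.map filt).foldl PySem.Set.union (filt v)) (fun x => x) false
      (comparable, aggregate)

-- ===== PORT B =====
def collect_model_metric_sets_alt (model_fields : List (String × List String)) : List String × List String :=
  if model_fields = [] then ([], [])
  else
    let d := pvToDict model_fields
    let n : Int := (d.size : Int)        -- n = len(model_fields)
    -- one pass: all_fields |= fields; for dim in dims: counts[dim] = counts.get(dim, 0) + 1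
    let st := d.values.foldl
      (fun st fields =>
        (PySem.Set.union st.1 fields,
         (pvDims fields).foldl (fun c dim => c.insert dim (c.getD dim 0 + 1)) st.2))
      (([] : PySem.Set String), (PySem.Dict.empty : PySem.Dict String Int))
    -- sorted(dim for dim, c in counts.items() if c == n)
    let comparable := PySem.List.sorted ((st.2.items.filter (fun p => p.2 == n)).map (fun p => p.1)) (fun x => x) false
    let paired := pvPaired comparable
    -- sorted(f for f in all_fields if f not in paired)
    let aggregate := PySem.List.sorted (st.1.filter (fun f => !(PySem.Set.contains paired f))) (fun x => x) false
    (comparable, aggregate)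

-- ===== PRECONDITION & SPEC =====
def Spec_collect_model_metric_sets (model_fields : List (String × List String)) (out : List String × List String) : Prop := out = collect_model_metric_sets_alt model_fields
instance (model_fields : List (String × List String)) (out : List String × List String) : Decidable (Spec_collect_model_metric_sets model_fields out) := by unfold Spec_collect_model_metric_sets; infer_instance

-- ===== CLAIM (what is proved, stated in full; the proofs are below) =====
def Claim_equal_collect_model_metric_sets : Prop := ∀ (model_fields : List (String × List String)), Dom_collect_model_metric_sets model_fields → Spec_collect_model_metric_sets model_fields (collect_model_metric_sets model_fields)

-- ===== LEMMAS AND PROOFS =====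

lemma pv_mem_foldl_inter (l : List (PySem.Set String)) (s : PySem.Set String) (x : String) :
    x ∈ l.foldl PySem.Set.inter s ↔ x ∈ s ∧ ∀ t ∈ l, x ∈ t := by
  induction l generalizing s with
  | nil => simp
  | cons h t ih => simp [List.foldl_cons, ih, PySem.Set.mem_inter]; tauto

lemma pv_nodup_foldl_inter (l : List (PySem.Set String)) (s : PySem.Set String) (hs : s.Nodup) :
    (l.foldl PySem.Set.inter s).Nodup := by
  induction l generalizing s with
  | nil => exact hs
  | cons h t ih => exact ih _ (PySem.Set.nodup_inter s h hs)

lemma pv_mem_foldl_union (l : List (PySem.Set String)) (s : PySem.Set String) (x : String) :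
    x ∈ l.foldl PySem.Set.union s ↔ x ∈ s ∨ ∃ t ∈ l, x ∈ t := by
  induction l generalizing s with
  | nil => simp
  | cons h t ih => simp [List.foldl_cons, ih, PySem.Set.mem_union]; tauto

lemma pv_nodup_foldl_union (l : List (PySem.Set String)) (s : PySem.Set String) (hs : s.Nodup) :
    (l.foldl PySem.Set.union s).Nodup := by
  induction l generalizing s with
  | nil => exact hs
  | cons h t ih => exact ih _ (PySem.Set.nodup_union s h hs)

-- the nested counting loop: value at k = total count of k over all the dimension lists
lemma pv_counts_getD (dss : List (List String)) (c : PySem.Dict String Int) (k : String) :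
    (dss.foldl (fun c ds => ds.foldl (fun c dim => c.insert dim (c.getD dim 0 + 1)) c) c).getD k 0
      = c.getD k 0 + ((dss.map (fun ds => (ds.count k : Int))).sum) := by
  induction dss generalizing c with
  | nil => simp
  | cons h t ih =>
    simp only [List.foldl_cons, List.map_cons, List.sum_cons]
    rw [ih, PySem.Dict.getD_foldl_insert_add_one]
    ring

lemma pv_counts_mem_keys (dss : List (List String)) (c : PySem.Dict String Int) (k : String) :
    k ∈ (dss.foldl (fun c ds => ds.foldl (fun c dim => c.insert dim (c.getD dim 0 + 1)) c) c).keys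
      ↔ k ∈ c.keys ∨ ∃ ds ∈ dss, k ∈ ds := by
  induction dss generalizing c with
  | nil => simp
  | cons h t ih =>
    simp only [List.foldl_cons, ih, PySem.Dict.keys_foldl_insert, PySem.Set.mem_update]
    simp; tauto

lemma pv_counts_nodup_keys (dss : List (List String)) (c : PySem.Dict String Int)
    (hc : c.keys.Nodup) :
    (dss.foldl (fun c ds => ds.foldl (fun c dim => c.insert dim (c.getD dim 0 + 1)) c) c).keys.Nodup := by
  induction dss generalizing c with
  | nil => exact hc
  | cons h t ih => exact ih _ (PySem.Dict.nodup_keys_foldl_insert h _ c hc)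

-- a 0/1 count sum over nodup lists is a countP
lemma pv_sum_count_eq_countP (dss : List (List String)) (k : String)
    (hnd : ∀ ds ∈ dss, ds.Nodup) :
    ((dss.map (fun ds => (ds.count k : Int))).sum) = ((dss.countP (fun ds => decide (k ∈ ds)) : Nat) : Int) := by
  induction dss with
  | nil => simp
  | cons h t ih =>
    simp only [List.map_cons, List.sum_cons, List.countP_cons]
    rw [ih (fun ds hds => hnd ds (List.mem_cons_of_mem h hds))]
    by_cases hk : k ∈ h
    · rw [List.count_eq_one_of_mem (hnd h (List.mem_cons_self)) hk]
      simp [hk]; ring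
    · rw [List.count_eq_zero_of_not_mem hk]
      simp [hk]


lemma pv_nodup_foldl_union' (l : List (PySem.Set String)) :
    (l.foldl (fun s fields => PySem.Set.union s fields) ([] : PySem.Set String)).Nodup :=
  pv_nodup_foldl_union l [] List.nodup_nil

lemma pv_nodup_dims (fields : List String) : (pvDims fields).Nodup := PySem.Set.nodup_ofList _

-- the comparable lists of the two ports are equal (intersection vs count-equals-n)
lemma pv_main (v : List String) (rest : List (List String)) (nI : Int)
    (hn : nI = ((rest.length + 1 : Nat) : Int)) :
    PySem.List.sorted ((rest.map pvDims).foldl PySem.Set.inter (pvDims v)) (fun x => x) false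
      = PySem.List.sorted (((((v :: rest).map pvDims).foldl
            (fun c ds => ds.foldl (fun c dim => c.insert dim (c.getD dim 0 + 1)) c)
            (PySem.Dict.empty : PySem.Dict String Int)).items.filter (fun p => p.2 == nI)).map (fun p => p.1)) (fun x => x) false := by
  set dss := (v :: rest).map pvDims with hdss
  set C := dss.foldl (fun c ds => ds.foldl (fun c dim => c.insert dim (c.getD dim 0 + 1)) c)
      (PySem.Dict.empty : PySem.Dict String Int) with hC
  set LA := (rest.map pvDims).foldl PySem.Set.inter (pvDims v) with hLA
  set LB := (C.items.filter (fun p => p.2 == nI)).map (fun p => p.1) with hLB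
  have hndss : ∀ ds ∈ dss, ds.Nodup := by
    intro ds hds
    obtain ⟨f, -, rfl⟩ := List.mem_map.mp hds
    exact pv_nodup_dims f
  have hCnd : C.keys.Nodup := by
    rw [hC]
    exact pv_counts_nodup_keys _ _ (by rw [PySem.Dict.keys_empty]; exact List.nodup_nil)
  have hgetD : ∀ x, C.getD x 0 = ((dss.countP (fun ds => decide (x ∈ ds)) : Nat) : Int) := by
    intro x
    rw [hC, pv_counts_getD, pv_sum_count_eq_countP _ x hndss, PySem.Dict.getD_empty, zero_add]
  have hkeysmem : ∀ x, x ∈ C.keys ↔ ∃ ds ∈ dss, x ∈ ds := by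
    intro x
    rw [hC, pv_counts_mem_keys]
    simp [PySem.Dict.keys_empty]
  have hmemc : ∀ x, x ∈ LA ↔ x ∈ LB := by
    intro x
    have hA : x ∈ LA ↔ ∀ ds ∈ dss, x ∈ ds := by
      rw [hLA, pv_mem_foldl_inter, hdss]
      simp
    have hB : x ∈ LB ↔ x ∈ C.keys ∧ C.getD x 0 = nI := by
      rw [hLB]
      constructor
      · intro hx
        obtain ⟨p, hp, rfl⟩ := List.mem_map.mp hx
        have hpf := List.mem_filter.mp hp
        have hpn : p.2 = nI := by simpa using hpf.2
        refine ⟨PySem.Dict.mem_keys_of_mem_items C hpf.1, ?_⟩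
        rw [PySem.Dict.getD_of_mem_items C hpf.1 hCnd]
        exact hpn
      · rintro ⟨hk, hg⟩
        have hk' : ∃ p ∈ C.items, p.1 = x := by
          have hx : x ∈ C.items.map (fun p => p.1) := by
            simpa [PySem.Dict.keys] using hk
          simpa using hx
        obtain ⟨p, hp, hpx⟩ := hk'
        have hval : C.getD x 0 = p.2 := by
          rw [← hpx]
          exact PySem.Dict.getD_of_mem_items C hp hCnd 0
        have hpn : p.2 = nI := by rw [← hval, hg]
        exact List.mem_map.mpr ⟨p, List.mem_filter.mpr ⟨hp, by simp [hpn]⟩, hpx⟩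
    rw [hA, hB]
    have hlendss : dss.length = rest.length + 1 := by simp [hdss]
    constructor
    · intro h
      have hex : ∃ ds ∈ dss, x ∈ ds := ⟨pvDims v, by simp [hdss], h _ (by simp [hdss])⟩
      refine ⟨(hkeysmem x).mpr hex, ?_⟩
      rw [hgetD x]
      have hcp : dss.countP (fun ds => decide (x ∈ ds)) = dss.length :=
        List.countP_eq_length.mpr (by intro a ha; simpa using h a ha)
      rw [hcp, hlendss, hn]
    · rintro ⟨_, hg⟩
      intro ds hds
      rw [hgetD x, hn] at hg
      have hcp : dss.countP (fun ds => decide (x ∈ ds)) = dss.length := by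
        have : dss.countP (fun ds => decide (x ∈ ds)) = rest.length + 1 := by exact_mod_cast hg
        omega
      have := List.countP_eq_length.mp hcp ds hds
      simpa using this
  have hAnd : LA.Nodup := pv_nodup_foldl_inter _ _ (pv_nodup_dims v)
  have hBnd : LB.Nodup := by
    have hsub : List.Sublist LB (C.items.map (fun p => p.1)) :=
      List.Sublist.map _ List.filter_sublist
    have hkm : (C.items.map (fun p => p.1)).Nodup := by simpa [PySem.Dict.keys] using hCnd
    exact hkm.sublist hsub
  exact (PySem.List.sorted_id_eq_sorted_id_iff_perm LA LB).mpr
    ((List.perm_ext_iff_of_nodup hAnd hBnd).mpr hmemc)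

-- the aggregate lists of the two ports are equal (union of filtered sets vs filtered union)
lemma pv_agg (v : List String) (rest : List (List String)) (pa : PySem.Set String) :
    PySem.List.sorted ((rest.map (fun fields =>
        PySem.Set.ofList (fields.filter (fun f => !(PySem.Set.contains pa f))))).foldl
        PySem.Set.union (PySem.Set.ofList (v.filter (fun f => !(PySem.Set.contains pa f))))) (fun x => x) false
      = PySem.List.sorted (((v :: rest).foldl (fun s fields => PySem.Set.union s fields)
          ([] : PySem.Set String)).filter (fun f => !(PySem.Set.contains pa f))) (fun x => x) false := by
  set LAgg := (rest.map (fun fields =>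
      PySem.Set.ofList (fields.filter (fun f => !(PySem.Set.contains pa f))))).foldl
      PySem.Set.union (PySem.Set.ofList (v.filter (fun f => !(PySem.Set.contains pa f)))) with hLAgg
  set LBgg := ((v :: rest).foldl (fun s fields => PySem.Set.union s fields)
      ([] : PySem.Set String)).filter (fun f => !(PySem.Set.contains pa f)) with hLBgg
  have hBu : ∀ x, x ∈ (v :: rest).foldl (fun s fields => PySem.Set.union s fields) ([] : PySem.Set String)
      ↔ ∃ t ∈ v :: rest, x ∈ t := by
    intro x
    simpa using pv_mem_foldl_union (v :: rest) ([] : PySem.Set String) x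
  have hmem : ∀ x, x ∈ LAgg ↔ x ∈ LBgg := by
    intro x
    rw [hLAgg, hLBgg, pv_mem_foldl_union, List.mem_filter, hBu]
    simp only [PySem.Set.mem_ofList, List.mem_filter, List.mem_map]
    constructor
    · rintro (⟨hv, hp⟩ | ⟨t, ⟨fields, hf, rfl⟩, ht⟩)
      · exact ⟨⟨v, List.mem_cons_self, hv⟩, hp⟩
      · rw [PySem.Set.mem_ofList, List.mem_filter] at ht
        exact ⟨⟨fields, List.mem_cons_of_mem v hf, ht.1⟩, ht.2⟩
    · rintro ⟨⟨t, ht, hx⟩, hp⟩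
      rcases List.mem_cons.mp ht with rfl | ht'
      · exact Or.inl ⟨hx, hp⟩
      · refine Or.inr ⟨_, ⟨t, ht', rfl⟩, ?_⟩
        rw [PySem.Set.mem_ofList, List.mem_filter]
        exact ⟨hx, hp⟩
  have hAnd : LAgg.Nodup := pv_nodup_foldl_union _ _ (PySem.Set.nodup_ofList _)
  have hBnd : LBgg.Nodup := (pv_nodup_foldl_union' (v :: rest)).filter _
  exact (PySem.List.sorted_id_eq_sorted_id_iff_perm LAgg LBgg).mpr
    ((List.perm_ext_iff_of_nodup hAnd hBnd).mpr hmem)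

-- ===== VERDICT (by name: the statement is the Claim_ definition above) =====
theorem collect_model_metric_sets_spec : Claim_equal_collect_model_metric_sets := by
  intro mf _hdom
  unfold Spec_collect_model_metric_sets
  by_cases hmf : mf = []
  · simp [collect_model_metric_sets, collect_model_metric_sets_alt, hmf]
  · obtain ⟨q, mt, hq⟩ := List.exists_cons_of_ne_nil hmf
    have hkeys : (pvToDict mf).keys = PySem.Set.ofList (mf.map (fun p => p.1)) := by
      unfold pvToDict
      rw [PySem.Dict.keys_foldl_insert_key mf (fun p => p.1) (fun _ p => PySem.Set.ofList p.2) PySem.Dict.empty,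
          PySem.Dict.keys_empty, PySem.Set.update_nil_left]
    have hqk : q.1 ∈ (pvToDict mf).keys := by
      rw [hkeys, PySem.Set.mem_ofList]
      exact List.mem_map_of_mem (by rw [hq]; exact List.mem_cons_self)
    have hvne : (pvToDict mf).values ≠ [] := by
      intro hnil
      have h1 : (pvToDict mf).values.length = (pvToDict mf).keys.length := by
        simp [PySem.Dict.values, PySem.Dict.keys]
      rw [hnil] at h1
      cases hK : (pvToDict mf).keys with
      | nil => rw [hK] at hqk; simp at hqk
      | cons a l => rw [hK] at h1; simp at h1
    obtain ⟨v, rest, hv⟩ := List.exists_cons_of_ne_nil hvne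
    have hsize : ((pvToDict mf).size : Int) = ((rest.length + 1 : Nat) : Int) := by
      have h1 : (pvToDict mf).values.length = (pvToDict mf).size := by
        simp [PySem.Dict.values, PySem.Dict.size]
      rw [hv] at h1
      simp at h1
      rw [← h1]
    simp only [collect_model_metric_sets, collect_model_metric_sets_alt, if_neg hmf, hv]
    rw [PySem.List.foldl_prod_mk
        (f := fun (s : PySem.Set String) (fields : List String) => PySem.Set.union s fields)
        (g := fun (c : PySem.Dict String Int) (fields : List String) =>
          (pvDims fields).foldl (fun c dim => c.insert dim (c.getD dim 0 + 1)) c)]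
    dsimp only
    rw [← List.foldl_map (f := pvDims)
        (g := fun (c : PySem.Dict String Int) (ds : PySem.Set String) =>
          ds.foldl (fun c dim => c.insert dim (c.getD dim 0 + 1)) c)]
    rw [pv_main v rest _ hsize]
    rw [pv_agg v rest]
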